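-- pv_equiv track=rewrite | github.com/nhsengland/Reusable-Code-Library | src/dsp/udfs/misc.py | count_iapt_care_contact_dna_duplicates
-- ===== SOURCE A (Python) =====
-- from collections import OrderedDict, Counter
--
-- def count_iapt_care_contact_dna_duplicates(code_list: list):
--     """
--         Counts the number of duplicate IDS201CareContact AttendOrDNACode entries.
--         Only multiples, or combinations of, 5 and 6 are classed as duplicates.
--         Other repeating integers are NOT classed as duplicates.
--
--     Args:
--         code_list: a collected list of AttendOrDNACode values from a partitioned data set.
--
--     Returns: a count of duplicated AttendOrDNACodes of 5 and 6, or a count 1 if no duplicates are found.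
--
--     """
--     count = 0
--     c = Counter(code_list)
--     list_counts = dict(c)
--     for key, value in list_counts.items():
--         if key in ["5", "6"]:
--             count += value
--
--     return count
-- ===== SOURCE B (Python) =====
-- def count_iapt_care_contact_dna_duplicates(code_list: list):
--     count = 0
--     for code in code_list:
--         if code in ["5", "6"]:
--             count += 1
--     return count
-- ===== Notes on version B (the rewrite author's own statement) =====
-- stated objective: simpler
-- what changed: Replaced the two-phase Counter/dict build plus iteration over unique keys with a single direct pass over code_list incrementing a running total for each '5' or '6'.
import Mathlib
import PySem

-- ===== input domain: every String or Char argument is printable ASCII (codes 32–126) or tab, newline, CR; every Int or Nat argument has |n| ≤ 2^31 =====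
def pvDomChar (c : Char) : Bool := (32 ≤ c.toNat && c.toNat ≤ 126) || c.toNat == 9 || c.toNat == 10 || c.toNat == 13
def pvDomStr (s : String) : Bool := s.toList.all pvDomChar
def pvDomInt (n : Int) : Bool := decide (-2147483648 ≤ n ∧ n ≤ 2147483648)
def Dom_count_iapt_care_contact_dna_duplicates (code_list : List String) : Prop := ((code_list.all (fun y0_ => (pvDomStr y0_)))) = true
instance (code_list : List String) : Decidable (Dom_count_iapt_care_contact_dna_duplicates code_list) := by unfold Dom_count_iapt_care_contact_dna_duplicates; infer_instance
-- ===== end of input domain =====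

-- B replaces A's Counter/dict build + iteration over unique keys with one direct scan (objective: simpler).


-- ===== PORT A =====
-- count = 0; c = Counter(code_list); for key, value in dict(c).items(): if key in ["5","6"]: count += value
def count_iapt_care_contact_dna_duplicates (code_list : List String) : Int :=
  let count : Int := 0
  let c := PySem.Dict.counter code_list
  let list_counts := c
  list_counts.items.foldl
    (fun count kv => if kv.1 ∈ ["5", "6"] then count + kv.2 else count) count

-- ===== PORT B =====
-- count = 0; for code in code_list: if code in ["5","6"]: count += 1
def count_iapt_care_contact_dna_duplicates_alt (code_list : List String) : Int :=
  code_list.foldl (fun count code => if code ∈ ["5", "6"] then count + 1 else count) 0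

-- ===== PRECONDITION & SPEC =====
def Spec_count_iapt_care_contact_dna_duplicates (code_list : List String) (out : Int) : Prop := out = count_iapt_care_contact_dna_duplicates_alt code_list
instance (code_list : List String) (out : Int) : Decidable (Spec_count_iapt_care_contact_dna_duplicates code_list out) := by unfold Spec_count_iapt_care_contact_dna_duplicates; infer_instance

-- ===== CLAIM (what is proved, stated in full; the proofs are below) =====
def Claim_equal_count_iapt_care_contact_dna_duplicates : Prop := ∀ (code_list : List String), Dom_count_iapt_care_contact_dna_duplicates code_list → Spec_count_iapt_care_contact_dna_duplicates code_list (count_iapt_care_contact_dna_duplicates code_list)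

-- ===== LEMMAS AND PROOFS =====

-- B's loop accumulates exactly count("5") + count("6").
theorem pvB_eq (xs : List String) (acc : Int) :
    xs.foldl (fun count code => if code ∈ ["5", "6"] then count + 1 else count) acc
      = acc + (xs.count "5" : Int) + (xs.count "6" : Int) := by
  induction xs generalizing acc with
  | nil => simp
  | cons x t ih =>
    simp only [List.foldl_cons, List.count_cons, ih]
    by_cases h5 : x = "5" <;> by_cases h6 : x = "6" <;>
      simp [h5, h6] <;> ring

-- A's loop over a nodup key list contributes count k for each key k in {"5","6"}.
theorem pvA_eq (xs : List String) (l : List String) (acc : Int) (hnd : l.Nodup) :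
    (l.map (fun k => (k, (xs.count k : Int)))).foldl
        (fun count kv => if kv.1 ∈ ["5", "6"] then count + kv.2 else count) acc
      = acc + (if "5" ∈ l then (xs.count "5" : Int) else 0)
            + (if "6" ∈ l then (xs.count "6" : Int) else 0) := by
  induction l generalizing acc with
  | nil => simp
  | cons k t ih =>
    obtain ⟨hk, hnd'⟩ := List.nodup_cons.mp hnd
    rw [List.map_cons, List.foldl_cons, ih _ hnd']
    by_cases h5 : k = "5"
    · subst h5; simp [hk]; try (split_ifs <;> ring)
    · by_cases h6 : k = "6"
      · subst h6; simp [hk, Ne.symm h5]; try (split_ifs <;> ring)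
      · simp [h5, h6, Ne.symm h5, Ne.symm h6]

-- ===== VERDICT (by name: the statement is the Claim_ definition above) =====
theorem count_iapt_care_contact_dna_duplicates_spec : Claim_equal_count_iapt_care_contact_dna_duplicates := by
  intro xs _
  unfold Spec_count_iapt_care_contact_dna_duplicates
  show (PySem.Dict.counter xs).items.foldl
      (fun count kv => if kv.1 ∈ ["5", "6"] then count + kv.2 else count) 0
    = xs.foldl (fun count code => if code ∈ ["5", "6"] then count + 1 else count) 0
  rw [PySem.Dict.items_counter, pvA_eq xs _ _ (PySem.Set.nodup_ofList xs), pvB_eq]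
  by_cases h5 : "5" ∈ xs <;> by_cases h6 : "6" ∈ xs <;>
    simp [PySem.Set.mem_ofList, h5, h6, List.count_eq_zero_of_not_mem]
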